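-- pv_equiv track=rewrite | github.com/ninedata-cloud/dbclaw | backend/services/datasource_metric_merge.py | merge_integration_metric_data
-- ===== SOURCE A (Python) =====
-- from typing import Any, Mapping
--
-- INTEGRATION_PREFERRED_METRIC_KEYS = {
--     "cpu_usage",
--     "memory_usage",
--     "disk_usage",
--     "disk_total",
--     "disk_data",
--     "disk_log",
--     "disk_temp",
--     "disk_system",
--     "iops",
--     "throughput",
--     "qps",
--     "tps",
--     "network_in",
--     "network_out",
--     "network_rx_bytes",
--     "network_tx_bytes",
-- }
--
-- def merge_integration_metric_data(
--     existing_data: Mapping[str, Any] | None,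
--     incoming_data: Mapping[str, Any] | None,
-- ) -> dict[str, Any]:
--     """
--     合并外部集成指标。
--
--     - 对云监控优先字段，使用 incoming 覆盖 existing
--     - 对其他字段，仅在 existing 缺失时补充，避免覆盖直连采集更可信的值
--     """
--     merged = dict(existing_data or {})
--     for key, value in (incoming_data or {}).items():
--         if key in INTEGRATION_PREFERRED_METRIC_KEYS:
--             merged[key] = value
--             continue
--         merged.setdefault(key, value)
--     return merged
-- ===== SOURCE B (Python) =====
-- INTEGRATION_PREFERRED_METRIC_KEYS = {
--     "cpu_usage",
--     "memory_usage",
--     "disk_usage",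
--     "disk_total",
--     "disk_data",
--     "disk_log",
--     "disk_temp",
--     "disk_system",
--     "iops",
--     "throughput",
--     "qps",
--     "tps",
--     "network_in",
--     "network_out",
--     "network_rx_bytes",
--     "network_tx_bytes",
-- }
--
--
-- def merge_integration_metric_data(existing_data, incoming_data):
--     existing = dict(existing_data or {})
--     incoming = dict(incoming_data or {})
--
--     def resolve(key):
--         # incoming wins exactly when it holds the key and the key is either
--         # a preferred metric or absent from existing; otherwise existing wins.
--         if key in incoming and (key in INTEGRATION_PREFERRED_METRIC_KEYS or key not in existing):
--             return incoming[key]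
--         return existing[key]
--
--     key_order = list(existing) + [k for k in incoming if k not in existing]
--     return {k: resolve(k) for k in key_order}
-- ===== Notes on version B (the rewrite author's own statement) =====
-- stated objective: alternative
-- what changed: Replaces A's mutate-as-you-scan merge (insert/setdefault per incoming item) by a key-schedule + resolver decomposition: compute the output key order once (existing keys, then new incoming keys) and map each key through a pure resolver that decides which dict supplies its value; no dict is mutated.
import Mathlib
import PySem

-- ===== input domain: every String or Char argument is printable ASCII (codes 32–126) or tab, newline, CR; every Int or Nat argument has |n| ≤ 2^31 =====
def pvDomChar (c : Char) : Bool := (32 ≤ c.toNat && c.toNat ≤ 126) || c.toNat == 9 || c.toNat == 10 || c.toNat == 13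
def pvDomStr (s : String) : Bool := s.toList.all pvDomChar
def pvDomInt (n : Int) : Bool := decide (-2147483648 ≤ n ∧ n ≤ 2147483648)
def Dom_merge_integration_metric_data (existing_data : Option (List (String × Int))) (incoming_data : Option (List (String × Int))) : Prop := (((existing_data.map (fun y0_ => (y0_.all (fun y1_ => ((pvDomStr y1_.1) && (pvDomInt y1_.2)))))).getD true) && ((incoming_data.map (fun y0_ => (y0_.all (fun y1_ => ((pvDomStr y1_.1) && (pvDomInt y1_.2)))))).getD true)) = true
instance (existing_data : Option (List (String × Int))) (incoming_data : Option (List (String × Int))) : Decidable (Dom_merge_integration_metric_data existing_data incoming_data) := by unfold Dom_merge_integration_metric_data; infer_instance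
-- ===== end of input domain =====

-- B replaces A's mutate-as-you-scan merge by a key-schedule + resolver decomposition
-- (key order computed once, a pure per-key resolver picks the winning value); same return value.

-- ===== PORT A =====
def INTEGRATION_PREFERRED_METRIC_KEYS : PySem.Set String := PySem.Set.ofList
  ["cpu_usage", "memory_usage", "disk_usage", "disk_total", "disk_data", "disk_log",
   "disk_temp", "disk_system", "iops", "throughput", "qps", "tps", "network_in",
   "network_out", "network_rx_bytes", "network_tx_bytes"]

def merge_integration_metric_data (existing_data : Option (List (String × Int))) (incoming_data : Option (List (String × Int))) : List (String × Int) :=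
  let merged := PySem.Dict.ofList (existing_data.getD [])
  let final := (PySem.Dict.ofList (incoming_data.getD [])).items.foldl
    (fun m kv =>
      if INTEGRATION_PREFERRED_METRIC_KEYS.contains kv.1 then m.insert kv.1 kv.2
      else m.setdefault kv.1 kv.2)
    merged
  final.items

-- ===== PORT B =====
def merge_integration_metric_data_alt (existing_data : Option (List (String × Int))) (incoming_data : Option (List (String × Int))) : List (String × Int) :=
  let existing := PySem.Dict.ofList (existing_data.getD [])
  let incoming := PySem.Dict.ofList (incoming_data.getD [])
  -- resolve(key): incoming[key] / existing[key]; the branch guard makes the chosen dict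
  -- always hold the key, so the getD default 0 is unreachable (Python's d[k] never raises here)
  let resolve := fun (k : String) =>
    if incoming.contains k && (INTEGRATION_PREFERRED_METRIC_KEYS.contains k || !(existing.contains k))
    then incoming.getD k 0 else existing.getD k 0
  -- key_order = list(existing) + [k for k in incoming if k not in existing]
  let key_order := existing.keys ++ incoming.keys.filter (fun k => !(existing.contains k))
  -- {k: resolve(k) for k in key_order}
  (PySem.Dict.ofList (key_order.map (fun k => (k, resolve k)))).items

-- ===== PRECONDITION & SPEC =====
def Spec_merge_integration_metric_data (existing_data : Option (List (String × Int))) (incoming_data : Option (List (String × Int))) (out : List (String × Int)) : Prop := out = merge_integration_metric_data_alt existing_data incoming_data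
instance (existing_data : Option (List (String × Int))) (incoming_data : Option (List (String × Int))) (out : List (String × Int)) : Decidable (Spec_merge_integration_metric_data existing_data incoming_data out) := by unfold Spec_merge_integration_metric_data; infer_instance

-- ===== CLAIM (what is proved, stated in full; the proofs are below) =====
def Claim_equal_merge_integration_metric_data : Prop := ∀ (existing_data : Option (List (String × Int))) (incoming_data : Option (List (String × Int))), Dom_merge_integration_metric_data existing_data incoming_data → Spec_merge_integration_metric_data existing_data incoming_data (merge_integration_metric_data existing_data incoming_data)

-- ===== LEMMAS AND PROOFS =====

-- first-match lookup on a raw pair list (what Dict.get? does on d.items)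
def pvLook (L : List (String × Int)) (k : String) : Option Int :=
  (L.find? (fun q => q.1 == k)).map (·.2)

-- the value an existing item ends up with after A's loop over L
def pvUpd (L : List (String × Int)) (p : String × Int) : String × Int :=
  if INTEGRATION_PREFERRED_METRIC_KEYS.contains p.1 then
    match pvLook L p.1 with
    | some v => (p.1, v)
    | none => p
  else p

lemma pvLook_cons (kv : String × Int) (rest : List (String × Int)) (k : String) :
    pvLook (kv :: rest) k = if kv.1 == k then some kv.2 else pvLook rest k := by
  by_cases h : (kv.1 == k) = true <;> simp [pvLook, h]

lemma pvLook_eq_none (L : List (String × Int)) (k : String)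
    (h : k ∉ L.map (·.1)) : pvLook L k = none := by
  simp only [pvLook, Option.map_eq_none_iff, List.find?_eq_none]
  intro q hq hbeq
  exact h (List.mem_map.mpr ⟨q, hq, eq_of_beq hbeq⟩)

-- with nodup keys, looking up an item's own key returns its own value
lemma pvLook_self (L : List (String × Int)) (p : String × Int)
    (hnd : (L.map (·.1)).Nodup) (hp : p ∈ L) : pvLook L p.1 = some p.2 := by
  induction L with
  | nil => cases hp
  | cons q rest ih =>
    simp only [List.map_cons, List.nodup_cons] at hnd
    rw [pvLook_cons]
    rcases List.mem_cons.mp hp with h | h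
    · subst h; simp
    · have hne : (q.1 == p.1) = false := by
        by_cases he : q.1 = p.1
        · exact absurd (he ▸ List.mem_map.mpr ⟨p, h, rfl⟩) hnd.1
        · simp [he]
      rw [hne]
      simp only [Bool.false_eq_true, if_false]
      exact ih hnd.2 h

lemma pvUpd_nil (p : String × Int) : pvUpd [] p = p := by
  unfold pvUpd pvLook
  simp

lemma pvUpd_cons_nonpref (kv : String × Int) (rest : List (String × Int))
    (hkv : kv.1 ∉ INTEGRATION_PREFERRED_METRIC_KEYS)
    (p : String × Int) : pvUpd (kv :: rest) p = pvUpd rest p := by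
  unfold pvUpd
  by_cases hp : p.1 ∈ INTEGRATION_PREFERRED_METRIC_KEYS
  · rw [pvLook_cons]
    have hne : (kv.1 == p.1) = false := by
      by_cases h : kv.1 = p.1
      · exact absurd (h ▸ hp) hkv
      · simp [h]
    simp [hp, hne]
  · simp [hp]

lemma pvUpd_cons_notmem (kv : String × Int) (rest : List (String × Int))
    (p : String × Int) (hne : kv.1 ≠ p.1) : pvUpd (kv :: rest) p = pvUpd rest p := by
  unfold pvUpd
  rw [pvLook_cons]
  simp [hne]

lemma pvUpd_fresh (rest : List (String × Int)) (kv : String × Int)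
    (h : kv.1 ∉ rest.map (·.1)) : pvUpd rest (kv.1, kv.2) = kv := by
  unfold pvUpd
  rw [pvLook_eq_none rest kv.1 h]
  split <;> rfl

-- A's loop characterised: existing items get updated in place, fresh incoming keys append
lemma loopA (L : List (String × Int)) (m : PySem.Dict String Int)
    (hL : (L.map (·.1)).Nodup) :
    (L.foldl (fun m kv =>
        if INTEGRATION_PREFERRED_METRIC_KEYS.contains kv.1 then m.insert kv.1 kv.2
        else m.setdefault kv.1 kv.2) m).items
      = m.items.map (pvUpd L) ++ L.filter (fun kv => !(m.contains kv.1)) := by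
  induction L generalizing m with
  | nil =>
    simp only [List.foldl_nil, List.filter_nil, List.append_nil]
    rw [show m.items.map (pvUpd []) = m.items.map id from
      List.map_congr_left (fun p _ => pvUpd_nil p), List.map_id]
  | cons kv rest ih =>
    simp only [List.map_cons, List.nodup_cons] at hL
    obtain ⟨hkv_not, hrest⟩ := hL
    have hfil : ∀ v, rest.filter (fun q => !((m.insert kv.1 v).contains q.1))
        = rest.filter (fun q => !(m.contains q.1)) := by
      intro v
      apply List.filter_congr
      intro q hq
      have hne : q.1 ≠ kv.1 := by
        intro h; exact hkv_not (h ▸ List.mem_map.mpr ⟨q, hq, rfl⟩)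
      rw [PySem.Dict.contains_insert]
      simp [hne]
    simp only [List.foldl_cons]
    by_cases hpref : kv.1 ∈ INTEGRATION_PREFERRED_METRIC_KEYS
    · rw [if_pos (by simpa using hpref)]
      by_cases hc : m.contains kv.1 = true
      · rw [ih _ hrest]
        rw [PySem.Dict.items_insert_of_contains m kv.2 hc]
        rw [List.map_map, List.filter_cons]
        simp only [hc, Bool.not_true, Bool.false_eq_true, if_false]
        congr 1
        · apply List.map_congr_left
          intro p _
          simp only [Function.comp_apply]
          by_cases hp : p.1 = kv.1
          · have hb : (p.1 == kv.1) = true := by simp [hp]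
            simp only [hb, if_true]
            unfold pvUpd
            rw [pvLook_cons]
            have h1 : pvLook rest kv.1 = none := pvLook_eq_none _ _ hkv_not
            simp [hpref, hp, h1]
          · have hb : (p.1 == kv.1) = false := by simp [hp]
            simp only [hb, Bool.false_eq_true, if_false]
            rw [pvUpd_cons_notmem kv rest p (fun h => hp h.symm)]
        · rw [hfil]
      · rw [ih _ hrest]
        rw [PySem.Dict.items_insert_of_not_contains m kv.2 (by simpa using hc)]
        rw [List.map_append, List.filter_cons]
        simp only [Bool.not_eq_true] at hc
        simp only [hc, Bool.not_false, if_true]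
        have hmap : m.items.map (pvUpd rest) = m.items.map (pvUpd (kv :: rest)) := by
          apply List.map_congr_left
          intro p hp
          have hne : kv.1 ≠ p.1 := by
            intro h
            rw [Bool.eq_false_iff] at hc
            apply hc
            rw [PySem.Dict.contains_iff_mem_keys, h]
            exact List.mem_map.mpr ⟨p, hp, rfl⟩
          exact (pvUpd_cons_notmem kv rest p hne).symm
        rw [hmap, hfil, List.map_singleton, pvUpd_fresh rest kv hkv_not]
        simp
    · rw [if_neg (by simpa using hpref)]
      have hupd_all : ∀ p, pvUpd (kv :: rest) p = pvUpd rest p :=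
        pvUpd_cons_nonpref kv rest hpref
      have hmap : m.items.map (pvUpd rest) = m.items.map (pvUpd (kv :: rest)) :=
        List.map_congr_left (fun p _ => (hupd_all p).symm)
      by_cases hc : m.contains kv.1 = true
      · rw [PySem.Dict.setdefault_of_contains m kv.2 hc, ih _ hrest, List.filter_cons]
        simp only [hc, Bool.not_true, Bool.false_eq_true, if_false]
        rw [hmap]
      · rw [PySem.Dict.setdefault_of_not_contains m kv.2 (by simpa using hc), ih _ hrest]
        rw [PySem.Dict.items_insert_of_not_contains m kv.2 (by simpa using hc)]
        rw [List.map_append, List.filter_cons]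
        simp only [Bool.not_eq_true] at hc
        simp only [hc, Bool.not_false, if_true]
        rw [hmap, hfil, List.map_singleton, pvUpd_fresh rest kv hkv_not]
        simp

-- ofList of a pair list with distinct keys keeps it unchanged
lemma ofList_items_of_nodup (l : List (String × Int)) (h : (l.map (·.1)).Nodup) :
    (PySem.Dict.ofList l).items = l := by
  have := PySem.Dict.items_foldl_insert_fresh l (·.1) (·.2) PySem.Dict.empty
    (fun a _ => by simp [PySem.Dict.contains_empty]) h
  simpa [PySem.Dict.ofList, PySem.Dict.update] using this

-- ===== VERDICT (by name: the statement is the Claim_ definition above) =====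
theorem merge_integration_metric_data_spec : Claim_equal_merge_integration_metric_data := by
  intro existing_data incoming_data _
  unfold Spec_merge_integration_metric_data
  unfold merge_integration_metric_data merge_integration_metric_data_alt
  simp only []
  set E := PySem.Dict.ofList (existing_data.getD []) with hE
  set I := PySem.Dict.ofList (incoming_data.getD []) with hI
  have hEkeys : (E.items.map (·.1)).Nodup := PySem.Dict.nodup_keys_ofList _
  have hIkeys : (I.items.map (·.1)).Nodup := PySem.Dict.nodup_keys_ofList _
  have hgetE : ∀ k, E.get? k = pvLook E.items k := fun _ => rfl
  have hgetI : ∀ k, I.get? k = pvLook I.items k := fun _ => rfl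
  rw [loopA I.items E hIkeys]
  -- B's key_order.map (k, resolve k), split over the append
  have hkeysE : E.keys = E.items.map (·.1) := rfl
  have hkeysI : I.keys = I.items.map (·.1) := rfl
  -- head part: over existing keys, resolver reproduces pvUpd
  have hhead_eq : (E.items.map (·.1)).map (fun k => (k,
      if I.contains k && (INTEGRATION_PREFERRED_METRIC_KEYS.contains k || !(E.contains k))
      then I.getD k 0 else E.getD k 0)) = E.items.map (pvUpd I.items) := by
    rw [List.map_map]
    apply List.map_congr_left
    intro p hp
    have hcE : E.contains p.1 = true := by
      rw [PySem.Dict.contains_iff_mem_keys]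
      exact List.mem_map.mpr ⟨p, hp, rfl⟩
    have hEself : E.getD p.1 0 = p.2 := by
      simp [PySem.Dict.getD, hgetE, pvLook_self E.items p hEkeys hp]
    have hcontI : I.contains p.1 = (pvLook I.items p.1).isSome := by
      rw [← hgetI, PySem.Dict.contains_eq_isSome_get?]
    simp only [Function.comp_apply, hcE, Bool.not_true, Bool.or_false]
    by_cases hpref : p.1 ∈ INTEGRATION_PREFERRED_METRIC_KEYS
    · cases hfind : pvLook I.items p.1 with
      | none =>
        simp only [hcontI, hfind, Option.isSome_none, Bool.false_and, Bool.false_eq_true,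
          if_false, hEself]
        unfold pvUpd
        rw [hfind]
        simp [hpref]
      | some v =>
        have hIv : I.getD p.1 0 = v := by simp [PySem.Dict.getD, hgetI, hfind]
        simp only [hcontI, hfind, Option.isSome_some]
        rw [if_pos (by simp [hpref])]
        unfold pvUpd
        rw [hfind]
        simp [hpref, hIv]
    · unfold pvUpd
      simp [hpref, hEself]
  -- tail part: over new incoming keys, resolver reproduces the incoming item
  have htail_eq : ((I.items.map (·.1)).filter (fun k => !(E.contains k))).map (fun k => (k,
      if I.contains k && (INTEGRATION_PREFERRED_METRIC_KEYS.contains k || !(E.contains k))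
      then I.getD k 0 else E.getD k 0)) = I.items.filter (fun kv => !(E.contains kv.1)) := by
    rw [List.filter_map, List.map_map]
    simp only [Function.comp_def]
    conv_rhs => rw [← List.map_id (I.items.filter (fun kv => !(E.contains kv.1)))]
    apply List.map_congr_left
    intro p hp
    have hpfil := List.mem_filter.mp hp
    have hcI : I.contains p.1 = true := by
      rw [PySem.Dict.contains_iff_mem_keys]
      exact List.mem_map.mpr ⟨p, hpfil.1, rfl⟩
    have hIself : I.getD p.1 0 = p.2 := by
      simp [PySem.Dict.getD, hgetI, pvLook_self I.items p hIkeys hpfil.1]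
    have hcEf : E.contains p.1 = false := by simpa using hpfil.2
    simp [hcI, hcEf, hIself]
  have hBlist : ((E.keys ++ I.keys.filter (fun k => !(E.contains k))).map (fun k => (k,
      if I.contains k && (INTEGRATION_PREFERRED_METRIC_KEYS.contains k || !(E.contains k))
      then I.getD k 0 else E.getD k 0)))
      = E.items.map (pvUpd I.items) ++ I.items.filter (fun kv => !(E.contains kv.1)) := by
    rw [List.map_append, hkeysE, hkeysI, hhead_eq, htail_eq]
  rw [hBlist]
  -- the assembled list has distinct keys, so B's final dict comprehension keeps it
  have hmap1 : (E.items.map (pvUpd I.items)).map (·.1) = E.items.map (·.1) := by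
    rw [List.map_map]
    apply List.map_congr_left
    intro p _
    simp only [Function.comp_apply]
    unfold pvUpd
    split
    · split <;> rfl
    · rfl
  have htailnd : ((I.items.filter (fun kv => !(E.contains kv.1))).map (·.1)).Nodup :=
    hIkeys.sublist ((List.filter_sublist).map _)
  have happ : (((E.items.map (pvUpd I.items))
      ++ I.items.filter (fun kv => !(E.contains kv.1))).map (·.1)).Nodup := by
    rw [List.map_append, hmap1]
    refine hEkeys.append htailnd ?_
    intro k hk1 hk2
    obtain ⟨q, hq, hq1⟩ := List.mem_map.mp hk2
    have hqfil := List.mem_filter.mp hq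
    have hcE : E.contains q.1 = true := by
      rw [PySem.Dict.contains_iff_mem_keys]
      exact hq1 ▸ hk1
    simp [hcE] at hqfil
  exact (ofList_items_of_nodup _ happ).symm
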